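-- pv_equiv track=rewrite | github.com/orlafoley/CS1117 | functions7.py | is_stairs
-- ===== SOURCE A (Python) =====
-- def is_stairs(s):
--
--     if len(s) < 2:
--         #Blank and one character list are false
--         return False
--
--     list = 'down'
--     if ord(str(s[0]).lower()) == ord(str(s[1]).lower()) -1:
--         list = 'up'
--     found = True
--
--     for i in range(len(s)-1):
--
--         if list == 'up':
--             if ord(str(s[i]).lower()) != ord(str(s[i+1]).lower()) - 1:
--                 # For an ascending list
--                 found = False
--                 break
--         else:
--             if ord(str(s[i]).lower()) != ord(str(s[i+1]).lower()) + 1: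
--                 # For an descending list
--                 found = False
--                 break
--     return found
-- ===== SOURCE B (Python) =====
-- def is_stairs(s):
--     if len(s) < 2:
--         return False
--     codes = [ord(str(c).lower()) for c in s]
--     pairs = list(zip(codes, codes[1:]))
--     return all(a + 1 == b for a, b in pairs) or all(a == b + 1 for a, b in pairs)
-- ===== Notes on version B (the rewrite author's own statement) =====
-- stated objective: simpler
-- what changed: Replaces A's direction-flag-plus-found single pass by mapping each character to its case-normalised code once and then testing the adjacent pairs with two direct predicates (fully ascending, or fully descending) combined with or.
import Mathlib
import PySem

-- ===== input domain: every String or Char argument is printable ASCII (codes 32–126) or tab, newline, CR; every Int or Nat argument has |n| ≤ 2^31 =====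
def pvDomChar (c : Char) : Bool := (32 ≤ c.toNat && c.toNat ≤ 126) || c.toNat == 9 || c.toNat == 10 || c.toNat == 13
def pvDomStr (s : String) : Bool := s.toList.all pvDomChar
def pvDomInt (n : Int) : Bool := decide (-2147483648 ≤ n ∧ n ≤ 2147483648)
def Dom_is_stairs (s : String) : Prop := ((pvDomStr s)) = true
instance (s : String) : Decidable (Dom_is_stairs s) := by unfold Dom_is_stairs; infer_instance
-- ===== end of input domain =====

-- ===== PORT A =====
-- B changes A's direction-flag single pass into 'all ascending or all descending' over adjacent code pairs (objective: simpler).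
-- ord(str(c).lower()) for a single character c
def pyCode (c : Char) : Int := Int.ofNat (PySem.Chars.lowerChar c).toNat

-- A's 'for i in range(len(s)-1)' with early break, walking adjacent pairs
def stairsLoopA : List Char → String → Bool
  | c1 :: c2 :: rest, dir =>
    if dir == "up" then
      if pyCode c1 ≠ pyCode c2 - 1 then false else stairsLoopA (c2 :: rest) dir
    else
      if pyCode c1 ≠ pyCode c2 + 1 then false else stairsLoopA (c2 :: rest) dir
  | _, _ => true

def is_stairs (s : String) : Bool :=
  match s.toList with
  | c0 :: c1 :: rest =>
    let dir := if pyCode c0 = pyCode c1 - 1 then "up" else "down"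
    stairsLoopA (c0 :: c1 :: rest) dir
  | _ => false

-- ===== PORT B =====
def is_stairs_alt (s : String) : Bool :=
  let cs := s.toList
  if cs.length < 2 then false
  else
    let codes := cs.map pyCode
    let pairs := codes.zip codes.tail
    (pairs.all fun p => p.1 + 1 == p.2) || (pairs.all fun p => p.1 == p.2 + 1)

-- ===== PRECONDITION & SPEC =====
def Spec_is_stairs (s : String) (out : Bool) : Prop := out = is_stairs_alt s
instance (s : String) (out : Bool) : Decidable (Spec_is_stairs s out) := by unfold Spec_is_stairs; infer_instance

-- ===== CLAIM (what is proved, stated in full; the proofs are below) =====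
def Claim_equal_is_stairs : Prop := ∀ (s : String), Dom_is_stairs s → Spec_is_stairs s (is_stairs s)

-- ===== LEMMAS AND PROOFS =====
def ascRec : List Char → Bool
  | c1 :: c2 :: rest => (pyCode c1 + 1 == pyCode c2) && ascRec (c2 :: rest)
  | _ => true

def descRec : List Char → Bool
  | c1 :: c2 :: rest => (pyCode c1 == pyCode c2 + 1) && descRec (c2 :: rest)
  | _ => true

lemma zip_asc_eq (cs : List Char) :
    (((cs.map pyCode).zip (cs.map pyCode).tail).all fun p => p.1 + 1 == p.2) = ascRec cs := by
  induction cs with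
  | nil => rfl
  | cons a t ih =>
    cases t with
    | nil => rfl
    | cons b r =>
      simp only [List.map, List.tail, List.zip, List.zipWith, List.all] at *
      rw [ih]
      rfl

lemma zip_desc_eq (cs : List Char) :
    (((cs.map pyCode).zip (cs.map pyCode).tail).all fun p => p.1 == p.2 + 1) = descRec cs := by
  induction cs with
  | nil => rfl
  | cons a t ih =>
    cases t with
    | nil => rfl
    | cons b r =>
      simp only [List.map, List.tail, List.zip, List.zipWith, List.all] at *
      rw [ih]
      rfl

lemma loopA_up (cs : List Char) : stairsLoopA cs "up" = ascRec cs := by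
  induction cs with
  | nil => rfl
  | cons a t ih =>
    cases t with
    | nil => rfl
    | cons b r =>
      simp only [stairsLoopA, ascRec, ih]
      by_cases h : pyCode a ≠ pyCode b - 1 <;> simp [h] <;> omega

lemma loopA_down (cs : List Char) : stairsLoopA cs "down" = descRec cs := by
  induction cs with
  | nil => rfl
  | cons a t ih =>
    cases t with
    | nil => rfl
    | cons b r =>
      simp only [stairsLoopA, descRec, ih]
      by_cases h : pyCode a ≠ pyCode b + 1 <;> simp [h] <;> omega

-- ===== VERDICT (by name: the statement is the Claim_ definition above) =====
theorem is_stairs_spec : Claim_equal_is_stairs := by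
  intro s _
  unfold Spec_is_stairs is_stairs is_stairs_alt
  cases hcs : s.toList with
  | nil => simp
  | cons c0 t =>
    cases t with
    | nil => simp
    | cons c1 rest =>
      simp only [List.length_cons, zip_asc_eq, zip_desc_eq]
      have hlen : ¬ (rest.length + 1 + 1 < 2) := by omega
      simp only [if_neg hlen]
      by_cases h : pyCode c0 = pyCode c1 - 1
      · simp only [if_pos h, loopA_up]
        have : descRec (c0 :: c1 :: rest) = false ∨ ascRec (c0 :: c1 :: rest) = true := by
          by_cases ha : pyCode c0 == pyCode c1 + 1
          · exfalso; simp at ha; omega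
          · left; simp [descRec, ha]
        rcases this with hd | ha
        · simp [hd]
        · simp [ha]
      · simp only [if_neg h, loopA_down]
        have ha : ascRec (c0 :: c1 :: rest) = false := by
          simp [ascRec]; intro hh; omega
        simp [ha]
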